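-- pv_equiv track=rewrite | github.com/finwarman/advent-of-code-2020 | 14/02.py | generate_masks
-- ===== SOURCE A (Python) =====
-- def generate_masks(mask, index, results):
--     if index < 0:
--         return results
--     else:
--         new_res = []
--         if mask[index] == "X":
--             for m in results:
--                 new_res.append("0" + m)
--                 new_res.append("1" + m)
--         else:
--             for m in results:
--                 new_res.append(("-" if mask[index]=="0" else "1") + m)
--         return generate_masks(mask, index-1, new_res)
--
-- mask = "X" * 36
-- ===== SOURCE B (Python) =====
-- def generate_masks(mask, index, results):
--     current = results
--     for i in range(index, -1, -1):
--         c = mask[i]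
--         if c == "X":
--             current = [p + m for m in current for p in ("0", "1")]
--         else:
--             current = [("-" if c == "0" else "1") + m for m in current]
--     return current
-- ===== Notes on version B (the rewrite author's own statement) =====
-- stated objective: simpler
-- what changed: Replaces the tail recursion with an explicit countdown loop over range(index,-1,-1) that rebuilds the list with comprehensions (flat-map / map) instead of append loops inside a recursive call.
import Mathlib
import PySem

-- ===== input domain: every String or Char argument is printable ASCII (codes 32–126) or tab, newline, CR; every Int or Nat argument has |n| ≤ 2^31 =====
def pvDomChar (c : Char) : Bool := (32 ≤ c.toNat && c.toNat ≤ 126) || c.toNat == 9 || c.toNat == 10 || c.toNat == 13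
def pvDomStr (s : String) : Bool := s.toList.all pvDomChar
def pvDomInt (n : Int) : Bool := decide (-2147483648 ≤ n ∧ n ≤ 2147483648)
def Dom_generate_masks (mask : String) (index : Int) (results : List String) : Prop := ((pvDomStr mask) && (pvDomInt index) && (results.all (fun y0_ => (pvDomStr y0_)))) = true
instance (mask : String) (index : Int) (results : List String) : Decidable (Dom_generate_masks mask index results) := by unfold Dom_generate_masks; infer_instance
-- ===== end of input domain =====

-- B replaces A's tail recursion by an explicit countdown loop (foldl over range(index,-1,-1))
-- rebuilding the list with flat-map / map comprehensions; same cost, plainer shape.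


-- ===== PORT A =====
def generate_masks (mask : String) (index : Int) (results : List String) : List String :=
  if index < 0 then results
  else
    let new_res : List String :=
      if PySem.Str.pyGet? mask index = some 'X' then
        results.foldl (fun acc m => acc ++ ["0" ++ m, "1" ++ m]) []
      else
        results.foldl (fun acc m =>
          acc ++ [(if PySem.Str.pyGet? mask index = some '0' then "-" else "1") ++ m]) []
    generate_masks mask (index - 1) new_res
termination_by (index + 1).toNat
decreasing_by omega

-- ===== PORT B =====
def generate_masks_alt (mask : String) (index : Int) (results : List String) : List String :=
  (PySem.List.pyRange index (-1) (-1)).foldl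
    (fun current i =>
      let c := PySem.Str.pyGet? mask i
      if c = some 'X' then
        current.flatMap (fun m => ["0" ++ m, "1" ++ m])
      else
        current.map (fun m => (if c = some '0' then "-" else "1") ++ m))
    results

-- ===== PRECONDITION & SPEC =====
-- Pre_ excludes exactly the inputs where Python A raises IndexError: 0 ≤ index but index ≥ len(mask).
def Pre_generate_masks (mask : String) (index : Int) (results : List String) : Prop :=
  index < PySem.Str.len mask
instance (mask : String) (index : Int) (results : List String) : Decidable (Pre_generate_masks mask index results) := by unfold Pre_generate_masks; infer_instance

def pvWitness_generate_masks : String × Int × List String := ("X0", 1, ["a", "b"])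

def Spec_generate_masks (mask : String) (index : Int) (results : List String) (out : List String) : Prop := out = generate_masks_alt mask index results
instance (mask : String) (index : Int) (results : List String) (out : List String) : Decidable (Spec_generate_masks mask index results out) := by unfold Spec_generate_masks; infer_instance

-- ===== CLAIM (what is proved, stated in full; the proofs are below) =====
def Claim_equal_generate_masks : Prop := ∀ (mask : String) (index : Int) (results : List String), Dom_generate_masks mask index results → Pre_generate_masks mask index results → Spec_generate_masks mask index results (generate_masks mask index results)

-- ===== LEMMAS AND PROOFS =====

theorem map_eq_flatMap_singleton {α β : Type} (f : α → β) (l : List α) :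
    l.map f = l.flatMap (fun x => [f x]) := by
  induction l <;> simp_all

-- The two ports agree on every input (the out-of-range branch happens to coincide too;
-- Pre_ is still needed because Python A raises there while the ports return).
theorem generate_masks_eq_alt (mask : String) :
    ∀ (n : Nat) (index : Int), (index + 1).toNat ≤ n →
      ∀ results, generate_masks mask index results = generate_masks_alt mask index results := by
  intro n
  induction n with
  | zero =>
    intro index h results
    have hlt : index < 0 := by omega
    rw [generate_masks, if_pos hlt]
    unfold generate_masks_alt
    rw [PySem.List.pyRange_neg_one_eq_nil (by omega)]
    rfl
  | succ k ih =>
    intro index h results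
    by_cases hlt : index < 0
    · rw [generate_masks, if_pos hlt]
      unfold generate_masks_alt
      rw [PySem.List.pyRange_neg_one_eq_nil (by omega)]
      rfl
    · rw [generate_masks, if_neg hlt]
      unfold generate_masks_alt
      rw [PySem.List.pyRange_neg_one_cons (by omega : (-1 : Int) < index)]
      rw [List.foldl_cons]
      have hstep :
          (let c := PySem.Str.pyGet? mask index
           if c = some 'X' then
             results.flatMap (fun m => ["0" ++ m, "1" ++ m])
           else
             results.map (fun m => (if c = some '0' then "-" else "1") ++ m)) =
          (if PySem.Str.pyGet? mask index = some 'X' then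
             results.foldl (fun acc m => acc ++ ["0" ++ m, "1" ++ m]) []
           else
             results.foldl (fun acc m =>
               acc ++ [(if PySem.Str.pyGet? mask index = some '0' then "-" else "1") ++ m]) []) := by
        simp only [PySem.List.foldl_append_eq_flatMap,
          List.nil_append]
        split_ifs
        · rfl
        · rw [← map_eq_flatMap_singleton]
        · rw [← map_eq_flatMap_singleton]
      rw [← hstep]
      exact (ih (index - 1) (by omega) _).trans (by unfold generate_masks_alt; rfl)

-- ===== VERDICT (by name: the statement is the Claim_ definition above) =====
theorem generate_masks_spec : Claim_equal_generate_masks := by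
  intro mask index results _ _
  exact generate_masks_eq_alt mask (index + 1).toNat index le_rfl results
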